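-- pv_equiv track=rewrite | github.com/firedancer-io/firedancer | src/flamenco/runtime/log_inspector.py | str_list_to_hexdump
-- ===== SOURCE A (Python) =====
-- def str_list_to_hexdump(x):
--   res0 = x[1:-1].split(", ")
--   if res0[0] == "":
--     return ""
--   res2 = ""
--
--   for (i, z_str) in enumerate(res0):
--     z = int(z_str)
--     if i % 32 == 0:
--       res2 += "\n  {}  ".format(hex(i)[2:].rjust(8, "0"))
--     elif i % 16 == 0:
--       res2 += "  "
--     elif i % 4 == 0:
--       res2 += " "
--     res2+=hex(z)[2:].rjust(2, "0")
--   return res2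
-- ===== SOURCE B (Python) =====
-- def str_list_to_hexdump(x):
--     parts = x[1:-1].split(", ")
--     if parts[0] == "":
--         return ""
--     bs = [_byte(int(s)) for s in parts]
--     out = []
--     for k in range(0, len(bs), 32):
--         line = bs[k:k + 32]
--         body = "  ".join(
--             " ".join(
--                 "".join(half[g:g + 4]) for g in range(0, len(half), 4)
--             )
--             for half in (line[0:16], line[16:32]) if half
--         )
--         out.append("\n  " + format(k, "08x") + "  " + body)
--     return "".join(out)
--
--
-- def _byte(z):
--     return hex(z)[2:].rjust(2, "0")
-- ===== Notes on version B (the rewrite author's own statement) =====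
-- stated objective: alternative
-- what changed: B first formats every parsed int as a two-char hex byte string, then builds each output line by slicing that list into a 32-byte line, 16-byte halves and 4-byte groups and joining them with the fixed separators, instead of A's single pass that tests i % 32 / i % 16 / i % 4 at every byte while growing one string.
import Mathlib
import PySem

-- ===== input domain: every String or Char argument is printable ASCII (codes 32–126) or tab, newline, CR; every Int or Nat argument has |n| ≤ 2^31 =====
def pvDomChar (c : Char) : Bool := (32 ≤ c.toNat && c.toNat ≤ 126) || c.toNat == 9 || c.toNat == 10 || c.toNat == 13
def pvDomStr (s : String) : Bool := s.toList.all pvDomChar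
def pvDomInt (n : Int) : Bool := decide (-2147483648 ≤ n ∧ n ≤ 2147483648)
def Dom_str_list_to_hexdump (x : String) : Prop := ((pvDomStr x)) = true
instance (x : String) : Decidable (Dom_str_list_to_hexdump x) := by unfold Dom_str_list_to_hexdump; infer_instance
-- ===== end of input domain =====

-- B re-groups the dump by slicing the byte-string list into 32-byte lines / 16-byte halves / 4-byte
-- groups and joining them, instead of A's per-index modulo tests; return values are proved equal.

-- ===== PORT A =====

-- lowercase hex digits of n (the digit loop behind hex(n)); exact for n > 0
def hexChars (n : Nat) (acc : List Char) : List Char :=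
  if h : n = 0 then acc else hexChars (n / 16) (Nat.digitChar (n % 16) :: acc)
termination_by n
decreasing_by exact Nat.div_lt_self (Nat.pos_of_ne_zero h) (by omega)

-- hex(n)[2:] for n ≥ 0 (exact: hex(0) = "0x0")
def hexNatChars (n : Nat) : List Char := if n = 0 then ['0'] else hexChars n []

-- s.rjust(w, "0") (exact: left-pad with '0' to width w)
def rjust0 (w : Nat) (cs : List Char) : List Char := List.replicate (w - cs.length) '0' ++ cs

-- hex(z)[2:].rjust(2, "0") (exact also for z < 0: hex(-5)[2:] = "x5")
def byteHex (z : Int) : List Char :=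
  rjust0 2 (if z < 0 then 'x' :: hexChars z.natAbs [] else hexNatChars z.toNat)

-- "\n  {}  ".format(hex(i)[2:].rjust(8, "0"))
def hdrC (i : Nat) : List Char := '\n' :: ' ' :: ' ' :: (rjust0 8 (hexNatChars i) ++ [' ', ' '])

-- A's loop: for (i, z_str) in enumerate(res0), with the accumulated string as state
def aLoop : Nat → List Char → List (List Char) → List Char
  | _, acc, [] => acc
  | i, acc, zs :: rest =>
      let z := (PySem.Int.ofChars? zs).getD 0   -- int(z_str); Pre_ guarantees success
      let acc := if i % 32 = 0 then acc ++ hdrC i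
                 else if i % 16 = 0 then acc ++ [' ', ' ']
                 else if i % 4 = 0 then acc ++ [' '] else acc
      aLoop (i + 1) (acc ++ byteHex z) rest

def str_list_to_hexdump (x : String) : String :=
  let res0 := PySem.Chars.splitOn (PySem.Chars.slice x.toList (some 1) (some (-1))) ", ".toList
  if res0.headD [] = [] then ""                -- res0[0] == "": return ""
  else String.ofList (aLoop 0 [] res0)

-- ===== PORT B =====

-- [half[g:g+4] for g in range(0, len(half), 4)]: successive slices of at most 4 elements
def chunks4 : List (List Char) → List (List (List Char))
  | [] => []
  | [a] => [[a]]
  | [a, b] => [[a, b]]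
  | [a, b, c] => [[a, b, c]]
  | a :: b :: c :: d :: rest => [a, b, c, d] :: chunks4 rest

-- "  ".join(" ".join("".join(half[g:g+4]) …) for half in (line[0:16], line[16:32]) if half)
def lineBody (line : List (List Char)) : List Char :=
  let halves := [line.take 16, (line.drop 16).take 16].filter (· ≠ [])
  List.intercalate [' ', ' ']
    (halves.map (fun half => List.intercalate [' '] ((chunks4 half).map List.flatten)))

-- for k in range(0, len(bs), 32): emit "\n  " + format(k, "08x") + "  " + body(bs[k:k+32])
def bLines : Nat → List (List Char) → List Char
  | _, [] => []
  | k, b :: bs => hdrC k ++ lineBody (b :: (bs.take 31)) ++ bLines (k + 32) (bs.drop 31)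
termination_by _ l => l.length
decreasing_by simp

def str_list_to_hexdump_alt (x : String) : String :=
  let parts := PySem.Chars.splitOn (PySem.Chars.slice x.toList (some 1) (some (-1))) ", ".toList
  if parts.headD [] = [] then ""
  else String.ofList (bLines 0 (parts.map (fun s => byteHex ((PySem.Int.ofChars? s).getD 0))))

-- ===== PRECONDITION & SPEC =====
-- Pre_ excludes exactly the inputs where A raises ValueError: some element of the comma-split
-- inner string does not parse as an int (unless the first element is empty, where A returns "").
def Pre_str_list_to_hexdump (x : String) : Prop :=
  let parts := PySem.Chars.splitOn (PySem.Chars.slice x.toList (some 1) (some (-1))) ", ".toList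
  parts.headD [] = [] ∨ ∀ s ∈ parts, (PySem.Int.ofChars? s).isSome
instance (x : String) : Decidable (Pre_str_list_to_hexdump x) := by
  unfold Pre_str_list_to_hexdump; infer_instance

def pvWitness_str_list_to_hexdump : String := "[1, 2]"

def Spec_str_list_to_hexdump (x : String) (out : String) : Prop := out = str_list_to_hexdump_alt x
instance (x : String) (out : String) : Decidable (Spec_str_list_to_hexdump x out) := by
  unfold Spec_str_list_to_hexdump; infer_instance

-- ===== CLAIM (what is proved, stated in full; the proofs are below) =====
def Claim_equal_str_list_to_hexdump : Prop := ∀ (x : String), Dom_str_list_to_hexdump x → Pre_str_list_to_hexdump x → Spec_str_list_to_hexdump x (str_list_to_hexdump x)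

-- ===== LEMMAS AND PROOFS =====

-- A's loop over the list of already-formatted bytes (aLoop with the parse factored out)
def gLoop : Nat → List Char → List (List Char) → List Char
  | _, acc, [] => acc
  | i, acc, b :: rest =>
      let acc := if i % 32 = 0 then acc ++ hdrC i
                 else if i % 16 = 0 then acc ++ [' ', ' ']
                 else if i % 4 = 0 then acc ++ [' '] else acc
      gLoop (i + 1) (acc ++ b) rest

-- within-line separators at local position j (1 ≤ j ≤ 31), then the byte
def bodyAux : Nat → List (List Char) → List Char
  | _, [] => []
  | j, b :: r =>
      (if j % 16 = 0 then [' ', ' '] else if j % 4 = 0 then [' '] else []) ++ b ++ bodyAux (j + 1) r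

theorem aLoop_eq_gLoop (zs : List (List Char)) : ∀ i acc,
    aLoop i acc zs = gLoop i acc (zs.map (fun s => byteHex ((PySem.Int.ofChars? s).getD 0))) := by
  induction zs with
  | nil => intro i acc; rfl
  | cons z r ih => intro i acc; simp only [aLoop, gLoop, List.map]; exact ih _ _

theorem gLoop_acc' (l : List (List Char)) : ∀ i acc d,
    gLoop i (acc ++ d) l = acc ++ gLoop i d l := by
  induction l with
  | nil => intro i acc d; rfl
  | cons b r ih =>
      intro i acc d
      simp only [gLoop]
      split_ifs <;> simp only [List.append_assoc] <;> exact ih _ _ _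

theorem gLoop_acc (l : List (List Char)) (i : Nat) (acc : List Char) :
    gLoop i acc l = acc ++ gLoop i [] l := by
  have := gLoop_acc' l i acc []
  simpa using this

theorem gLoop_append (l₁ l₂ : List (List Char)) : ∀ i,
    gLoop i [] (l₁ ++ l₂) = gLoop i [] l₁ ++ gLoop (i + l₁.length) [] l₂ := by
  induction l₁ with
  | nil => intro i; simp [gLoop]
  | cons b r ih =>
      intro i
      simp only [gLoop, List.cons_append, List.length_cons]
      rw [gLoop_acc (r ++ l₂), ih, gLoop_acc r,
        show i + (r.length + 1) = i + 1 + r.length from by omega]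
      conv_rhs => rw [gLoop_acc r]
      simp [List.append_assoc]

theorem gLoop_tail (l : List (List Char)) : ∀ k j, k % 32 = 0 → 1 ≤ j → j + l.length ≤ 32 →
    gLoop (k + j) [] l = bodyAux j l := by
  induction l with
  | nil => intro k j _ _ _; rfl
  | cons b r ih =>
      intro k j hk hj hle
      simp only [List.length_cons] at hle
      have h32 : (k + j) % 32 ≠ 0 := by omega
      have h16 : (k + j) % 16 = 0 ↔ j % 16 = 0 := by omega
      have h4 : (k + j) % 4 = 0 ↔ j % 4 = 0 := by omega
      simp only [gLoop, bodyAux, if_neg h32]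
      rw [gLoop_acc]
      have : k + j + 1 = k + (j + 1) := by omega
      rw [this, ih k (j + 1) hk (by omega) (by omega)]
      by_cases hj16 : j % 16 = 0
      · simp [h16.mpr hj16, hj16, List.append_assoc]
      · have hk16 : ¬ (k + j) % 16 = 0 := fun h => hj16 (h16.mp h)
        by_cases hj4 : j % 4 = 0
        · simp [hk16, hj16, h4.mpr hj4, hj4, List.append_assoc]
        · have hk4 : ¬ (k + j) % 4 = 0 := fun h => hj4 (h4.mp h)
          simp [hk16, hj16, hk4, hj4, List.append_assoc]

theorem lineBody_eq (b : List Char) (r : List (List Char)) (h : r.length ≤ 31) :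
    lineBody (b :: r) = b ++ bodyAux 1 r := by
  rcases r with _|⟨b1, r⟩
  · simp [lineBody, chunks4, bodyAux, List.intercalate, List.intersperse]
  rcases r with _|⟨b2, r⟩
  · simp [lineBody, chunks4, bodyAux, List.intercalate, List.intersperse]
  rcases r with _|⟨b3, r⟩
  · simp [lineBody, chunks4, bodyAux, List.intercalate, List.intersperse]
  rcases r with _|⟨b4, r⟩
  · simp [lineBody, chunks4, bodyAux, List.intercalate, List.intersperse]
  rcases r with _|⟨b5, r⟩
  · simp [lineBody, chunks4, bodyAux, List.intercalate, List.intersperse]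
  rcases r with _|⟨b6, r⟩
  · simp [lineBody, chunks4, bodyAux, List.intercalate, List.intersperse]
  rcases r with _|⟨b7, r⟩
  · simp [lineBody, chunks4, bodyAux, List.intercalate, List.intersperse]
  rcases r with _|⟨b8, r⟩
  · simp [lineBody, chunks4, bodyAux, List.intercalate, List.intersperse]
  rcases r with _|⟨b9, r⟩
  · simp [lineBody, chunks4, bodyAux, List.intercalate, List.intersperse]
  rcases r with _|⟨b10, r⟩
  · simp [lineBody, chunks4, bodyAux, List.intercalate, List.intersperse]
  rcases r with _|⟨b11, r⟩
  · simp [lineBody, chunks4, bodyAux, List.intercalate, List.intersperse]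
  rcases r with _|⟨b12, r⟩
  · simp [lineBody, chunks4, bodyAux, List.intercalate, List.intersperse]
  rcases r with _|⟨b13, r⟩
  · simp [lineBody, chunks4, bodyAux, List.intercalate, List.intersperse]
  rcases r with _|⟨b14, r⟩
  · simp [lineBody, chunks4, bodyAux, List.intercalate, List.intersperse]
  rcases r with _|⟨b15, r⟩
  · simp [lineBody, chunks4, bodyAux, List.intercalate, List.intersperse]
  rcases r with _|⟨b16, r⟩
  · simp [lineBody, chunks4, bodyAux, List.intercalate, List.intersperse]
  rcases r with _|⟨b17, r⟩
  · simp [lineBody, chunks4, bodyAux, List.intercalate, List.intersperse]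
  rcases r with _|⟨b18, r⟩
  · simp [lineBody, chunks4, bodyAux, List.intercalate, List.intersperse]
  rcases r with _|⟨b19, r⟩
  · simp [lineBody, chunks4, bodyAux, List.intercalate, List.intersperse]
  rcases r with _|⟨b20, r⟩
  · simp [lineBody, chunks4, bodyAux, List.intercalate, List.intersperse]
  rcases r with _|⟨b21, r⟩
  · simp [lineBody, chunks4, bodyAux, List.intercalate, List.intersperse]
  rcases r with _|⟨b22, r⟩
  · simp [lineBody, chunks4, bodyAux, List.intercalate, List.intersperse]
  rcases r with _|⟨b23, r⟩
  · simp [lineBody, chunks4, bodyAux, List.intercalate, List.intersperse]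
  rcases r with _|⟨b24, r⟩
  · simp [lineBody, chunks4, bodyAux, List.intercalate, List.intersperse]
  rcases r with _|⟨b25, r⟩
  · simp [lineBody, chunks4, bodyAux, List.intercalate, List.intersperse]
  rcases r with _|⟨b26, r⟩
  · simp [lineBody, chunks4, bodyAux, List.intercalate, List.intersperse]
  rcases r with _|⟨b27, r⟩
  · simp [lineBody, chunks4, bodyAux, List.intercalate, List.intersperse]
  rcases r with _|⟨b28, r⟩
  · simp [lineBody, chunks4, bodyAux, List.intercalate, List.intersperse]
  rcases r with _|⟨b29, r⟩
  · simp [lineBody, chunks4, bodyAux, List.intercalate, List.intersperse]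
  rcases r with _|⟨b30, r⟩
  · simp [lineBody, chunks4, bodyAux, List.intercalate, List.intersperse]
  rcases r with _|⟨b31, r⟩
  · simp [lineBody, chunks4, bodyAux, List.intercalate, List.intersperse]
  rcases r with _|⟨b32, r⟩
  · simp [lineBody, chunks4, bodyAux, List.intercalate, List.intersperse]
  · exfalso; simp only [List.length_cons] at h; omega

theorem gLoop_line (b : List Char) (r : List (List Char)) (k : Nat) (hk : k % 32 = 0)
    (h : r.length ≤ 31) : gLoop k [] (b :: r) = hdrC k ++ lineBody (b :: r) := by
  simp only [gLoop, if_pos hk]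
  rw [gLoop_acc]
  have : k + 1 = k + 1 := rfl
  rw [gLoop_tail r k 1 hk (by omega) (by omega), lineBody_eq b r h]
  simp [List.append_assoc]

theorem gLoop_eq_bLines (n : Nat) : ∀ (l : List (List Char)) (k : Nat), l.length ≤ n →
    k % 32 = 0 → gLoop k [] l = bLines k l := by
  induction n with
  | zero =>
      intro l k hl _
      have : l = [] := List.eq_nil_of_length_eq_zero (by omega)
      subst this; rw [bLines]; rfl
  | succ n ih =>
      intro l k hl hk
      match l with
      | [] => rw [bLines]; rfl
      | b :: r =>
        by_cases hsmall : r.length ≤ 31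
        · rw [gLoop_line b r k hk hsmall, bLines,
            List.take_of_length_le hsmall, List.drop_eq_nil_of_le hsmall, bLines,
            List.append_nil]
        · have hlen : (b :: r.take 31).length = 32 := by
            simp
            omega
          have hdrop : (r.drop 31).length ≤ n := by
            simp at hl ⊢
            omega
          conv_rhs => rw [bLines]
          rw [show b :: r = (b :: r.take 31) ++ r.drop 31 from by simp, gLoop_append, hlen,
            gLoop_line b (r.take 31) k hk (by simp),
            ih (r.drop 31) (k + 32) hdrop (by omega)]

-- ===== VERDICT (by name: the statement is the Claim_ definition above) =====
theorem str_list_to_hexdump_spec : Claim_equal_str_list_to_hexdump := by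
  intro x _ _
  unfold Spec_str_list_to_hexdump str_list_to_hexdump str_list_to_hexdump_alt
  by_cases h : (PySem.Chars.splitOn (PySem.Chars.slice x.toList (some 1) (some (-1))) ", ".toList).headD [] = []
  · simp only [h, if_pos]
  · simp only [if_neg h]
    rw [aLoop_eq_gLoop]
    rw [gLoop_eq_bLines ((PySem.Chars.splitOn (PySem.Chars.slice x.toList (some 1) (some (-1))) ", ".toList).map (fun s => byteHex ((PySem.Int.ofChars? s).getD 0))).length _ 0 (le_refl _) (by omega)]
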